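-- pv_equiv track=rewrite | github.com/Turgibot/Multi-Variant-Simulated-Traffic-Dataset-Creator-and-Model-Tester | Academia/scripts/fix_mae_scatter_figures.py | _longest_dark_run_on_row
-- ===== SOURCE A (Python) =====
-- def _longest_dark_run_on_row(row: list[int], thresh: int) -> tuple[int, int, int]:
--     """Return (length, x_start, x_end) for longest contiguous run with sum < thresh."""
--     best = (0, -1, -1)
--     cur_s: int | None = None
--     for x, s in enumerate(row):
--         if s < thresh:
--             if cur_s is None:
--                 cur_s = x
--         else:
--             if cur_s is not None:
--                 ln = x - cur_s
--                 if ln > best[0]: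
--                     best = (ln, cur_s, x - 1)
--                 cur_s = None
--     if cur_s is not None:
--         ln = len(row) - cur_s
--         if ln > best[0]:
--             best = (ln, cur_s, len(row) - 1)
--     return best[0], best[1], best[2]
-- ===== SOURCE B (Python) =====
-- def _longest_dark_run_on_row(row: list[int], thresh: int) -> tuple[int, int, int]:
--     """Return (length, x_start, x_end) for longest contiguous run with sum < thresh.
--
--     Gap method: dark runs are exactly the gaps between consecutive bright
--     indices (elements >= thresh), with sentinels -1 and len(row) as outer
--     boundaries; max(key=length) keeps the first (earliest) longest gap.
--     """
--     bounds = [-1] + [i for i, s in enumerate(row) if s >= thresh] + [len(row)]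
--     gaps = [(b - a - 1, a + 1) for a, b in zip(bounds, bounds[1:])]
--     ln, start = max(gaps, key=lambda g: g[0])
--     if ln == 0:
--         return (0, -1, -1)
--     return (ln, start, start + ln - 1)
-- ===== Notes on version B (the rewrite author's own statement) =====
-- stated objective: alternative
-- what changed: Replaces A's stateful scan (optional run-start + running best) by a gap computation: collect the indices of bright elements with sentinels -1 and len(row), take pairwise differences of consecutive boundaries as (length, start) gaps, and pick the earliest longest gap with max(key=length).
import Mathlib
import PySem

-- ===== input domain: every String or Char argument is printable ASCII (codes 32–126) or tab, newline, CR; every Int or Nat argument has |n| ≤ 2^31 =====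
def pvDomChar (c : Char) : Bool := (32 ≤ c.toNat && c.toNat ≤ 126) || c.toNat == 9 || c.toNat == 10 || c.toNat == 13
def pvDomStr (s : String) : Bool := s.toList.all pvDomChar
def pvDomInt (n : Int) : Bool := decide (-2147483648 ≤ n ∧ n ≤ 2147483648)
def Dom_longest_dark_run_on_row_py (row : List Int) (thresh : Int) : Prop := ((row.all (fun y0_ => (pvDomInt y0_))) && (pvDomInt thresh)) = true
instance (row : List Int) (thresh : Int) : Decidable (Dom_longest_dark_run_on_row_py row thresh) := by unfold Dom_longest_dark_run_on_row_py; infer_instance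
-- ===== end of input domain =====

-- B replaces A's one-pass optional-state scan by a boundary/gap computation (bright indices with sentinels, pairwise gaps, first-max by length); alternative decomposition, same cost.


-- ===== PORT A =====
-- loop body of A: state = (best, cur_s)
def aStep (thresh : Int) (st : (Int × Int × Int) × Option Int) (p : Int × Int) : (Int × Int × Int) × Option Int :=
  if p.2 < thresh then
    match st.2 with
    | none => (st.1, some p.1)
    | some _ => st
  else
    match st.2 with
    | none => st
    | some c =>
      let ln := p.1 - c
      (if ln > st.1.1 then (ln, c, p.1 - 1) else st.1, none)

def longest_dark_run_on_row_py (row : List Int) (thresh : Int) : Int × Int × Int :=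
  let st := (PySem.List.enumerate row 0).foldl (aStep thresh) ((0, -1, -1), none)
  match st.2 with
  | none => st.1
  | some c =>
    let ln := (row.length : Int) - c
    if ln > st.1.1 then (ln, c, (row.length : Int) - 1) else st.1

-- ===== PORT B =====
-- [(b - a - 1, a + 1) for a, b in zip(bounds, bounds[1:])]
def bGaps (bounds : List Int) : List (Int × Int) :=
  (bounds.zip bounds.tail).map (fun p => (p.2 - p.1 - 1, p.1 + 1))

def longest_dark_run_on_row_py_alt (row : List Int) (thresh : Int) : Int × Int × Int :=
  let bounds : List Int :=
    -1 :: ((PySem.List.enumerate row 0).filter (fun p => decide (thresh ≤ p.2))).map Prod.fst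
       ++ [(row.length : Int)]
  let gaps := bGaps bounds
  match PySem.List.max? gaps (fun g => g.1) with
  | none => (0, -1, -1)   -- unreachable: bounds always has at least two elements
  | some m => if m.1 = 0 then (0, -1, -1) else (m.1, m.2, m.2 + m.1 - 1)

-- ===== PRECONDITION & SPEC =====
def Spec_longest_dark_run_on_row_py (row : List Int) (thresh : Int) (out : Int × Int × Int) : Prop := out = longest_dark_run_on_row_py_alt row thresh
instance (row : List Int) (thresh : Int) (out : Int × Int × Int) : Decidable (Spec_longest_dark_run_on_row_py row thresh out) := by unfold Spec_longest_dark_run_on_row_py; infer_instance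

-- ===== CLAIM (what is proved, stated in full; the proofs are below) =====
def Claim_equal_longest_dark_run_on_row_py : Prop := ∀ (row : List Int) (thresh : Int), Dom_longest_dark_run_on_row_py row thresh → Spec_longest_dark_run_on_row_py row thresh (longest_dark_run_on_row_py row thresh)

-- ===== LEMMAS AND PROOFS =====

-- A's tail fixup applied to the final loop state (n = len(row))
def aFix (n : Int) (st : (Int × Int × Int) × Option Int) : Int × Int × Int :=
  match st.2 with
  | none => st.1
  | some c => if n - c > st.1.1 then (n - c, c, n - 1) else st.1

theorem portA_eq (row : List Int) (thresh : Int) :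
    longest_dark_run_on_row_py row thresh
      = aFix (row.length) ((PySem.List.enumerate row 0).foldl (aStep thresh) ((0, -1, -1), none)) := rfl

-- bright indices of xs, enumeration starting at i (the middle part of B's bounds)
def brights (thresh : Int) (xs : List Int) (i : Int) : List Int :=
  ((PySem.List.enumerate xs i).filter (fun p => decide (thresh ≤ p.2))).map Prod.fst

-- fold over gaps producing A-style (len, start, end) triples, first strict max
def foldT (best : Int × Int × Int) (gaps : List (Int × Int)) : Int × Int × Int :=
  gaps.foldl (fun b g => if g.1 > b.1 then (g.1, g.2, g.2 + g.1 - 1) else b) best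

-- fold over gaps keeping the first gap with strictly greatest length
def foldP (m : Int × Int) (gaps : List (Int × Int)) : Int × Int :=
  gaps.foldl (fun b g => if b.1 < g.1 then g else b) m

theorem brights_nil (thresh : Int) (i : Int) : brights thresh [] i = [] := rfl

theorem brights_cons (thresh x : Int) (xs : List Int) (i : Int) :
    brights thresh (x :: xs) i =
      (if thresh ≤ x then [i] else []) ++ brights thresh xs (i + 1) := by
  simp only [brights, PySem.List.enumerate_cons, List.filter_cons]
  by_cases h : thresh ≤ x <;> simp [h]

theorem bGaps_cons_cons (a b : Int) (l : List Int) :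
    bGaps (a :: b :: l) = (b - a - 1, a + 1) :: bGaps (b :: l) := rfl

theorem foldT_cons (best : Int × Int × Int) (g : Int × Int) (rest : List (Int × Int)) :
    foldT best (g :: rest)
      = foldT (if g.1 > best.1 then (g.1, g.2, g.2 + g.1 - 1) else best) rest := rfl

-- the main loop correspondence: A's scan + tail fixup equals the gap fold, in both states of cur_s
theorem loop_eq (thresh : Int) : ∀ (xs : List Int) (i : Int) (best : Int × Int × Int)
    (cur : Option Int), 0 ≤ best.1 → (∀ c, cur = some c → c ≤ i) →
    aFix (i + xs.length) ((PySem.List.enumerate xs i).foldl (aStep thresh) (best, cur))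
    = foldT best
        (bGaps ((match cur with | none => i - 1 | some c => c - 1)
                  :: brights thresh xs i ++ [i + xs.length])) := by
  intro xs
  induction xs with
  | nil =>
    intro i best cur hb hc
    simp only [PySem.List.enumerate_nil, List.foldl_nil, brights_nil,
      List.length_nil, Nat.cast_zero, add_zero]
    cases cur with
    | none =>
      simp only [List.singleton_append]
      rw [bGaps_cons_cons, foldT_cons]
      rw [show (i - (i - 1) - 1 : Int) = 0 from by ring]
      rw [if_neg (by simpa using by omega : ¬ ((0 : Int) > best.1))]
      simp [aFix, foldT, bGaps]
    | some c =>
      simp only [List.singleton_append]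
      rw [bGaps_cons_cons]
      rw [show (i - (c - 1) - 1 : Int) = i - c from by ring,
          show (c - 1 + 1 : Int) = c from by ring]
      simp only [aFix, foldT, List.foldl_cons]
      rw [show (c + (i - c) - 1 : Int) = i - 1 from by ring]
      simp [bGaps, gt_iff_lt]
  | cons x xs ih =>
    intro i best cur hb hc
    rw [PySem.List.enumerate_cons, List.foldl_cons, brights_cons]
    rw [show (i + ((x :: xs).length : Int)) = (i + 1) + (xs.length : Int) from by
      simp; ring]
    by_cases hx : x < thresh
    · have hnb : ¬ thresh ≤ x := by omega
      simp only [hnb, if_false, List.nil_append]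
      cases cur with
      | none =>
        rw [show aStep thresh (best, none) (i, x) = (best, some i) from by simp [aStep, hx]]
        have h := ih (i + 1) best (some i) hb (by intro c hcc; cases hcc; omega)
        simpa using h
      | some c =>
        rw [show aStep thresh (best, some c) (i, x) = (best, some c) from by simp [aStep, hx]]
        have h := ih (i + 1) best (some c) hb
          (by intro c' hcc; cases hcc; have := hc c rfl; omega)
        simpa using h
    · have hbx : thresh ≤ x := by omega
      simp only [hbx, if_true, List.cons_append]
      cases cur with
      | none =>
        rw [show aStep thresh (best, none) (i, x) = (best, none) from by simp [aStep, hx]]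
        rw [bGaps_cons_cons, foldT_cons]
        rw [show (i - (i - 1) - 1 : Int) = 0 from by ring]
        rw [if_neg (by simpa using by omega : ¬ ((0 : Int) > best.1))]
        have h := ih (i + 1) best none hb (by intro c hcc; cases hcc)
        rw [show (i + 1 - 1 : Int) = i from by ring] at h
        exact h
      | some c =>
        have hci := hc c rfl
        rw [show aStep thresh (best, some c) (i, x)
              = (if i - c > best.1 then (i - c, c, i - 1) else best, none) from by
            simp [aStep, hx]]
        rw [bGaps_cons_cons, foldT_cons]
        rw [show (i - (c - 1) - 1 : Int) = i - c from by ring,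
            show (c - 1 + 1 : Int) = c from by ring]
        rw [show ((c + (i - c) - 1 : Int)) = i - 1 from by ring]
        have hb' : 0 ≤ (if i - c > best.1 then ((i - c, c, i - 1) : Int × Int × Int) else best).1 := by
          split_ifs with h1
          · simp; omega
          · exact hb
        have h := ih (i + 1) (if i - c > best.1 then (i - c, c, i - 1) else best) none hb'
          (by intro c' hcc; cases hcc)
        rw [show (i + 1 - 1 : Int) = i from by ring] at h
        exact h

theorem max?_cons_eq : ∀ (rest : List (Int × Int)) (g : Int × Int),
    PySem.List.max? (g :: rest) (fun x => x.1) = some (foldP g rest) := by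
  intro rest
  induction rest with
  | nil => intro g; simp [PySem.List.max?, foldP]
  | cons h t ih =>
    intro g
    have ihh := ih h
    have ihg := ih g
    simp only [PySem.List.max?, List.foldl_cons] at ihh ihg ⊢
    by_cases hc : g.1 < h.1
    · rw [if_pos hc, ihh, show foldP g (h :: t) = foldP h t from by simp [foldP, hc]]
    · rw [if_neg hc, ihg, show foldP g (h :: t) = foldP g t from by simp [foldP, hc]]

-- converting the first-max pair to A's triple commutes with the fold
theorem foldT_conv (gaps : List (Int × Int)) : ∀ (m : Int × Int), 0 ≤ m.1 →
    foldT (if m.1 = 0 then (0, -1, -1) else (m.1, m.2, m.2 + m.1 - 1)) gaps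
      = (if (foldP m gaps).1 = 0 then (0, -1, -1)
         else ((foldP m gaps).1, (foldP m gaps).2, (foldP m gaps).2 + (foldP m gaps).1 - 1)) := by
  induction gaps with
  | nil => intro m hm; simp [foldT, foldP]
  | cons g gaps ih =>
    intro m hm
    rw [foldT_cons]
    have hfst : (if m.1 = 0 then ((0 : Int), (-1 : Int), (-1 : Int)) else (m.1, m.2, m.2 + m.1 - 1)).1 = m.1 := by
      split_ifs with h <;> simp [h]
    rw [show foldP m (g :: gaps) = foldP (if m.1 < g.1 then g else m) gaps from by
      simp [foldP]]
    by_cases h : g.1 > m.1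
    · rw [hfst, if_pos h]
      have h0 : ¬ g.1 = 0 := by omega
      have := ih g (by omega)
      rw [if_neg h0] at this
      rw [if_pos (by omega : m.1 < g.1)]
      exact this
    · rw [hfst, if_neg h, if_neg (by omega : ¬ m.1 < g.1)]
      exact ih m hm

-- every bright index is ≥ the enumeration start
theorem brights_ge (thresh : Int) (xs : List Int) : ∀ (i : Int) (b : Int),
    b ∈ brights thresh xs i → i ≤ b := by
  induction xs with
  | nil => intro i b h; simp [brights_nil] at h
  | cons x xs ih =>
    intro i b h
    rw [brights_cons] at h
    rcases List.mem_append.mp h with h1 | h2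
    · split_ifs at h1 <;> simp_all
    · have := ih (i + 1) b h2; omega

-- ===== VERDICT (by name: the statement is the Claim_ definition above) =====
theorem longest_dark_run_on_row_py_spec : Claim_equal_longest_dark_run_on_row_py := by
  intro row thresh _
  unfold Spec_longest_dark_run_on_row_py
  rw [portA_eq]
  have hloop := loop_eq thresh row 0 (0, -1, -1) none (by norm_num) (by intro c h; cases h)
  simp only [zero_add, zero_sub] at hloop
  rw [hloop]
  show _ = longest_dark_run_on_row_py_alt row thresh
  unfold longest_dark_run_on_row_py_alt
  have hbform : ((PySem.List.enumerate row 0).filter (fun p => decide (thresh ≤ p.2))).map Prod.fst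
      = brights thresh row 0 := rfl
  rw [hbform]
  cases hbs : brights thresh row 0 with
  | nil =>
    simp only [List.singleton_append]
    rw [bGaps_cons_cons]
    rw [show ((row.length : Int) - (-1) - 1) = (row.length : Int) from by ring,
        show ((-1 : Int) + 1) = 0 from by ring]
    by_cases h : (row.length : Int) = 0
    · simp [h, foldT, bGaps, PySem.List.max?]
    · have hpos : (0 : Int) < (row.length : Int) := by
        have : (0 : Int) ≤ (row.length : Int) := Int.natCast_nonneg _
        omega
      simp [foldT, bGaps, PySem.List.max?]
      cases row <;> simp_all
  | cons b0 bt =>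
    have hge : (0 : Int) ≤ b0 := brights_ge thresh row 0 b0 (by rw [hbs]; simp)
    simp only [List.cons_append]
    rw [bGaps_cons_cons]
    rw [show (b0 - (-1) - 1 : Int) = b0 from by ring, show ((-1 : Int) + 1) = 0 from by ring]
    rw [foldT_cons]
    rw [show (if (b0 : Int) > (0 : Int) then ((b0 : Int), (0 : Int), (0 : Int) + b0 - 1)
          else ((0 : Int), (-1 : Int), (-1 : Int)))
        = (if ((b0, 0) : Int × Int).1 = 0 then ((0 : Int), (-1 : Int), (-1 : Int))
          else (((b0, 0) : Int × Int).1, ((b0, 0) : Int × Int).2,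
                ((b0, 0) : Int × Int).2 + ((b0, 0) : Int × Int).1 - 1)) from by
      simp only []
      split_ifs with h1 h2 <;> first | rfl | omega]
    rw [foldT_conv _ (b0, 0) (by simpa using hge)]
    rw [max?_cons_eq]
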